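-- pv_equiv track=rewrite | github.com/SansPapyrus683/everbody-codes | y2024/day8/p3.py | blocks_needed
-- ===== SOURCE A (Python) =====
-- ACOLYTES = 10
--
-- def blocks_needed(layers: int, priests: int):
--     thickness = [1]
--     layer = 1
--     used = 1
--     for _ in range(layers - 1):
--         layer += 1
--         thickness.append((thickness[-1] * priests) % ACOLYTES + ACOLYTES)
--         used += (2 * layer - 1) * thickness[-1]
--
--     width = 2 * layer - 1
--     heights = [0 for _ in range(width)]
--     for v, t in enumerate(thickness):
--         for i in range(layer - 1 - v, layer + v):
--             heights[i] += t
--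
--     needed = sum(heights)
--     for h in heights[1:-1]:
--         needed -= priests * width * h % ACOLYTES
--     return needed
-- ===== SOURCE B (Python) =====
-- ACOLYTES = 10
--
-- def blocks_needed(layers: int, priests: int):
--     # Same thickness recurrence, but the column heights are computed in O(layers)
--     # from running suffix sums instead of A's O(layers^2) nested range-increment loop.
--     thickness = [1]
--     for _ in range(layers - 1):
--         thickness.append(thickness[-1] * priests % ACOLYTES + ACOLYTES)
--     half, acc = [], 0
--     for t in reversed(thickness):
--         acc += t
--         half.append(acc)  # half[k] = sum of the last k+1 thicknesses
--     heights = half + list(reversed(half[:-1]))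
--     width = 2 * len(thickness) - 1
--     return sum(heights) - sum(priests * width * h % ACOLYTES for h in heights[1:-1])
-- ===== Notes on version B (the rewrite author's own statement) =====
-- stated objective: faster
-- what changed: A fills the heights array with a nested loop that re-adds each layer's thickness over its whole span (O(layers^2)); B computes each column height once as a running suffix sum of the thickness list and mirrors the first half, a single O(layers) pass.
import Mathlib
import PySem

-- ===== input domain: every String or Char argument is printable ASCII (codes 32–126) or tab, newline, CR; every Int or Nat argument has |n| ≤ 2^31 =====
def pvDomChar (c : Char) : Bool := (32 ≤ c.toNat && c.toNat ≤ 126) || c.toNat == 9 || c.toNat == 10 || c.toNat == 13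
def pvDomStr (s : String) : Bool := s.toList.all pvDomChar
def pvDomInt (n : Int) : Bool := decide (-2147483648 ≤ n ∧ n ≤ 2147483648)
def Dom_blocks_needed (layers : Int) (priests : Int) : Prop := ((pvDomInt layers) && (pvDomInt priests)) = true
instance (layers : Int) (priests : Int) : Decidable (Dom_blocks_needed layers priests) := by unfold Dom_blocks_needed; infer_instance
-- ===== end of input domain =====

-- B replaces A's quadratic nested range-increment over the heights array by a single
-- suffix-sum pass plus mirroring; equality of the two results is proved for all inputs.

def pvACOLYTES : Int := 10

-- ===== PORT A =====
-- first loop: state (thickness, layer, used); thickness[-1] is exact: the list starts [1] and only grows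
def aThickStep (priests : Int) (st : List Int × Int × Int) (_ : Int) : List Int × Int × Int :=
  let layer := st.2.1 + 1
  let t := PySem.Int.mod (PySem.List.pyGetD st.1 (-1) 0 * priests) pvACOLYTES + pvACOLYTES
  (st.1 ++ [t], layer, st.2.2 + (2 * layer - 1) * t)

-- heights[i] += t ; i is within range at every call A makes, so toNat and the default are exact
def aAdd (t : Int) (hs : List Int) (i : Int) : List Int :=
  hs.set i.toNat (PySem.List.pyGetD hs i 0 + t)

-- body of 'for v, t in enumerate(thickness)'
def aRowStep (layer : Int) (hs : List Int) (vt : Int × Int) : List Int :=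
  (PySem.List.pyRange (layer - 1 - vt.1) (layer + vt.1)).foldl (aAdd vt.2) hs

def blocks_needed (layers : Int) (priests : Int) : Int :=
  let st := (PySem.List.pyRange 0 (layers - 1)).foldl (aThickStep priests) ([1], 1, 1)
  let thickness := st.1
  let layer := st.2.1
  let width := 2 * layer - 1
  let heights := (PySem.List.pyRange 0 width).map (fun _ => (0 : Int))
  let heights := (PySem.List.enumerate thickness).foldl (aRowStep layer) heights
  let needed := heights.sum
  (PySem.List.slice heights (some 1) (some (-1))).foldl
    (fun acc h => acc - PySem.Int.mod (priests * width * h) pvACOLYTES) needed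

-- ===== PORT B =====
def bThickStep (priests : Int) (th : List Int) (_ : Int) : List Int :=
  th ++ [PySem.Int.mod (PySem.List.pyGetD th (-1) 0 * priests) pvACOLYTES + pvACOLYTES]

-- body of 'for t in reversed(thickness): acc += t; half.append(acc)'; state (half, acc)
def bHalfStep (st : List Int × Int) (t : Int) : List Int × Int :=
  (st.1 ++ [st.2 + t], st.2 + t)

def blocks_needed_alt (layers : Int) (priests : Int) : Int :=
  let thickness := (PySem.List.pyRange 0 (layers - 1)).foldl (bThickStep priests) [1]
  let half := (thickness.reverse.foldl bHalfStep ([], 0)).1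
  let heights := half ++ (PySem.List.slice half none (some (-1))).reverse
  let width := 2 * (thickness.length : Int) - 1
  heights.sum - ((PySem.List.slice heights (some 1) (some (-1))).map
      (fun h => PySem.Int.mod (priests * width * h) pvACOLYTES)).sum

-- ===== PRECONDITION & SPEC =====
def Spec_blocks_needed (layers : Int) (priests : Int) (out : Int) : Prop := out = blocks_needed_alt layers priests
instance (layers : Int) (priests : Int) (out : Int) : Decidable (Spec_blocks_needed layers priests out) := by unfold Spec_blocks_needed; infer_instance

-- ===== CLAIM (what is proved, stated in full; the proofs are below) =====
def Claim_equal_blocks_needed : Prop := ∀ (layers : Int) (priests : Int), Dom_blocks_needed layers priests → Spec_blocks_needed layers priests (blocks_needed layers priests)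

-- ===== LEMMAS AND PROOFS =====

-- contribution of the processed (index, thickness) pairs to column j, c = layer - 1
def contrib (c j : Int) (pairs : List (Int × Int)) : Int :=
  (pairs.map (fun p => if c - p.1 ≤ j ∧ j < c + 1 + p.1 then p.2 else 0)).sum

-- prefix-sum scan: preScan l a = [a + l[0], a + l[0] + l[1], …]
def preScan : List Int → Int → List Int
  | [], _ => []
  | t :: ts, a => (a + t) :: preScan ts (a + t)

theorem thick_agree (priests : Int) (l : List Int) :
    ∀ (th : List Int) (used : Int),
      (l.foldl (aThickStep priests) (th, (th.length : Int), used)).1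
          = l.foldl (bThickStep priests) th ∧
      (l.foldl (aThickStep priests) (th, (th.length : Int), used)).2.1
          = ((l.foldl (bThickStep priests) th).length : Int) := by
  induction l with
  | nil => intro th used; exact ⟨rfl, rfl⟩
  | cons x xs ih =>
    intro th used
    simp only [List.foldl_cons]
    have hstep : aThickStep priests (th, (th.length : Int), used) x
        = (bThickStep priests th x, ((bThickStep priests th x).length : Int),
            used + (2 * ((th.length : Int) + 1) - 1)
              * (PySem.Int.mod (PySem.List.pyGetD th (-1) 0 * priests) pvACOLYTES + pvACOLYTES)) := by
      simp only [aThickStep, bThickStep]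
      refine Prod.ext rfl (Prod.ext ?_ rfl)
      simp
    rw [hstep]
    exact ih _ _

theorem thick_ne_nil (priests : Int) (l : List Int) : ∀ (s : List Int), s ≠ [] →
    l.foldl (bThickStep priests) s ≠ [] := by
  induction l with
  | nil => intro s hs; exact hs
  | cons x xs ih =>
    intro s hs
    exact ih _ (by simp [bThickStep])

theorem inner_spec (t : Int) (b : Int) : ∀ (n : Nat) (a : Int) (hs : List Int), 0 ≤ a → b ≤ (hs.length : Int) →
    n = (b - a).toNat →
    (((PySem.List.pyRange a b).foldl (aAdd t) hs).length = hs.length ∧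
      ∀ j : Nat, ((PySem.List.pyRange a b).foldl (aAdd t) hs).getD j 0
        = hs.getD j 0 + (if a ≤ (j : Int) ∧ (j : Int) < b then t else 0)) := by
  intro n
  induction n with
  | zero =>
    intro a hs ha hb hn
    rw [PySem.List.pyRange_one_eq_nil (by omega)]
    refine ⟨rfl, fun j => ?_⟩
    rw [if_neg (by omega)]
    simp
  | succ m ih =>
    intro a hs ha hb hn
    have hab : a < b := by omega
    rw [PySem.List.pyRange_one_cons hab]
    simp only [List.foldl_cons]
    have hlen : (aAdd t hs a).length = hs.length := by simp [aAdd]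
    have hrec := ih (a + 1) (aAdd t hs a) (by omega) (by rw [hlen]; exact hb) (by omega)
    have hset : ∀ j : Nat, (aAdd t hs a).getD j 0
        = hs.getD j 0 + (if (j : Int) = a then t else 0) := by
      intro j
      simp only [aAdd, List.getD_eq_getElem?_getD, List.getElem?_set]
      by_cases hj : a.toNat = j
      · have hjlt : j < hs.length := by omega
        rw [if_pos hj, if_pos (show a.toNat < hs.length by omega), if_pos (by omega)]
        rw [PySem.List.pyGetD_of_nonneg _ _ ha]
        subst hj
        simp [List.getD_eq_getElem?_getD]
      · rw [if_neg hj, if_neg (by omega)]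
        simp
    refine ⟨by rw [hrec.1, hlen], fun j => ?_⟩
    rw [hrec.2 j, hset j]
    by_cases h1 : (j : Int) = a
    · rw [if_pos h1, if_neg (by omega), if_pos (by omega)]
      ring
    · rw [if_neg h1]
      by_cases h2 : a + 1 ≤ (j : Int) ∧ (j : Int) < b
      · rw [if_pos h2, if_pos (by omega)]; ring
      · rw [if_neg h2, if_neg (by omega)]; ring

theorem row_spec (layer : Int) (pairs : List (Int × Int)) :
    ∀ (hs : List Int), (∀ p ∈ pairs, 0 ≤ layer - 1 - p.1 ∧ layer + p.1 ≤ (hs.length : Int)) →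
      ((pairs.foldl (aRowStep layer) hs).length = hs.length ∧
        ∀ j : Nat, (pairs.foldl (aRowStep layer) hs).getD j 0
          = hs.getD j 0 + contrib (layer - 1) (j : Int) pairs) := by
  induction pairs with
  | nil => intro hs _; exact ⟨rfl, fun j => by simp [contrib]⟩
  | cons p ps ih =>
    intro hs hb
    have hp := hb p (List.mem_cons_self)
    have hinner := inner_spec p.2 (layer + p.1) ((layer + p.1 - (layer - 1 - p.1)).toNat)
      (layer - 1 - p.1) hs hp.1 hp.2 rfl
    simp only [List.foldl_cons]
    have hrow : aRowStep layer hs p = (PySem.List.pyRange (layer - 1 - p.1) (layer + p.1)).foldl (aAdd p.2) hs := rfl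
    have hrec := ih (aRowStep layer hs p) (by
      intro q hq
      have := (hb q (List.mem_cons_of_mem _ hq))
      rw [hrow, hinner.1]
      exact this)
    refine ⟨by rw [hrec.1, hrow, hinner.1], fun j => ?_⟩
    rw [hrec.2 j, hrow, hinner.2 j]
    simp only [contrib, List.map_cons, List.sum_cons]
    have : (layer - 1 - p.1 ≤ (j:Int) ∧ (j:Int) < layer + p.1)
        ↔ ((layer - 1) - p.1 ≤ (j:Int) ∧ (j:Int) < (layer - 1) + 1 + p.1) := by constructor <;> (intro h; omega)
    by_cases hc : (layer - 1) - p.1 ≤ (j:Int) ∧ (j:Int) < (layer - 1) + 1 + p.1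
    · rw [if_pos (this.mpr hc), if_pos hc]; ring
    · rw [if_neg (fun h => hc (this.mp h)), if_neg hc]; ring

theorem enum_mem_bounds (th : List Int) : ∀ (k : Int) (p : Int × Int),
    p ∈ PySem.List.enumerate th k → k ≤ p.1 ∧ p.1 < k + (th.length : Int) := by
  induction th with
  | nil => intro k p h; simp [PySem.List.enumerate] at h
  | cons t ts ih =>
    intro k p h
    simp only [PySem.List.enumerate, List.mem_cons] at h
    rcases h with h | h
    · subst h
      refine ⟨le_refl _, ?_⟩
      simp only [List.length_cons]
      push_cast
      omega
    · have := ih (k + 1) p h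
      simp only [List.length_cons]
      push_cast
      omega

theorem contrib_enum (c j : Int) (th : List Int) : ∀ k : Int,
    contrib c j (PySem.List.enumerate th k) = (th.drop ((|j - c| - k).toNat)).sum := by
  induction th with
  | nil => intro k; simp [PySem.List.enumerate, contrib]
  | cons t ts ih =>
    intro k
    have henum : PySem.List.enumerate (t :: ts) k = (k, t) :: PySem.List.enumerate ts (k + 1) := by
      simp [PySem.List.enumerate]
    rw [henum]
    simp only [contrib, List.map_cons, List.sum_cons]
    have hrec := ih (k + 1)
    by_cases hc : c - k ≤ j ∧ j < c + 1 + k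
    · have hd : |j - c| ≤ k := by
        rcases abs_cases (j - c) with ⟨h1, _⟩ | ⟨h1, _⟩ <;> omega
      rw [if_pos hc]
      show t + contrib c j (PySem.List.enumerate ts (k + 1)) = _
      rw [hrec]
      rw [show ((|j - c| - (k+1)).toNat) = 0 by omega, show ((|j - c| - k).toNat) = 0 by omega]
      simp
    · have hd : k < |j - c| := by
        rcases abs_cases (j - c) with ⟨h1, _⟩ | ⟨h1, _⟩ <;> omega
      rw [if_neg hc]
      show 0 + contrib c j (PySem.List.enumerate ts (k + 1)) = _
      rw [hrec]
      rw [show ((|j - c| - k).toNat) = ((|j - c| - (k+1)).toNat) + 1 by omega]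
      simp

theorem length_preScan (l : List Int) : ∀ a : Int, (preScan l a).length = l.length := by
  induction l with
  | nil => intro a; rfl
  | cons t ts ih => intro a; simp [preScan, ih]

theorem getD_preScan (l : List Int) : ∀ (a : Int) (j : Nat), j < l.length →
    (preScan l a).getD j 0 = a + (l.take (j + 1)).sum := by
  induction l with
  | nil => intro a j h; simp at h
  | cons t ts ih =>
    intro a j h
    cases j with
    | zero => simp [preScan]
    | succ j =>
      simp only [preScan, List.getD_cons_succ, List.take_succ_cons, List.sum_cons]
      rw [ih (a + t) j (by simpa using h)]
      ring

theorem half_fold (l : List Int) : ∀ (res : List Int) (acc : Int),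
    l.foldl bHalfStep (res, acc) = (res ++ preScan l acc, acc + l.sum) := by
  induction l with
  | nil => intro res acc; simp [preScan]
  | cons t ts ih =>
    intro res acc
    simp only [List.foldl_cons, bHalfStep, preScan, ih, List.sum_cons]
    refine Prod.ext ?_ (by ring)
    simp

theorem take_reverse_sum (th : List Int) (m : Nat) :
    (th.reverse.take m).sum = (th.drop (th.length - m)).sum := by
  rw [List.take_reverse, List.sum_reverse]

theorem zeros_getD (l : List Int) (j : Nat) : (l.map (fun _ => (0 : Int))).getD j 0 = 0 := by
  rcases lt_or_ge j l.length with h | h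
  · rw [List.getD_eq_getElem _ _ (by simpa using h)]; simp
  · rw [List.getD_eq_default _ _ (by simpa using h)]

theorem foldl_sub (f : Int → Int) (l : List Int) : ∀ a : Int,
    l.foldl (fun acc h => acc - f h) a = a - (l.map f).sum := by
  induction l with
  | nil => intro a; simp
  | cons x xs ih => intro a; simp [ih]; ring

-- ===== VERDICT (by name: the statement is the Claim_ definition above) =====
theorem heights_eq (th : List Int) (hth : th ≠ []) :
    (PySem.List.enumerate th 0).foldl (aRowStep (th.length : Int))
        ((PySem.List.pyRange 0 (2 * (th.length : Int) - 1)).map (fun _ => (0 : Int)))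
      = (th.reverse.foldl bHalfStep ([], 0)).1
          ++ (PySem.List.slice (th.reverse.foldl bHalfStep ([], 0)).1 none (some (-1))).reverse := by
  have hn : 1 ≤ th.length := List.length_pos_iff.mpr hth
  set n := th.length with hnn
  -- B side: half is the prefix-sum scan of th.reverse
  have hhalf : (th.reverse.foldl bHalfStep ([], 0)).1 = preScan th.reverse 0 := by
    rw [half_fold]; simp
  have lenhalf : (preScan th.reverse 0).length = n := by
    rw [length_preScan, List.length_reverse]
  have halfget : ∀ j : Nat, j < n → (preScan th.reverse 0).getD j 0 = (th.drop (n - 1 - j)).sum := by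
    intro j hj
    rw [getD_preScan _ _ _ (by simpa using hj), take_reverse_sum]
    rw [show n - (j + 1) = n - 1 - j by omega]
    simp
  -- A side: zeros then row additions
  set zeros := (PySem.List.pyRange 0 (2 * (n : Int) - 1)).map (fun _ => (0 : Int)) with hz
  have lenz : zeros.length = 2 * n - 1 := by
    rw [hz, List.length_map, PySem.List.length_pyRange_one]; omega
  have hrow := row_spec (n : Int) (PySem.List.enumerate th 0) zeros (by
    intro p hp
    have := enum_mem_bounds th 0 p hp
    constructor <;> [omega; (rw [lenz]; push_cast; omega)])
  set heightsA := (PySem.List.enumerate th 0).foldl (aRowStep (n : Int)) zeros with hA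
  have lenA : heightsA.length = 2 * n - 1 := by rw [hrow.1, lenz]
  have getA : ∀ j : Nat, heightsA.getD j 0 = (th.drop ((|(j : Int) - ((n : Int) - 1)|).toNat)).sum := by
    intro j
    rw [hrow.2 j, contrib_enum]
    rw [zeros_getD]
    simp
  -- the combined B list
  rw [hhalf, PySem.List.slice_to_neg_one]
  have lenB : (preScan th.reverse 0 ++ (preScan th.reverse 0).dropLast.reverse).length = 2 * n - 1 := by
    rw [List.length_append, List.length_reverse, List.length_dropLast, lenhalf]; omega
  apply List.ext_getElem (by omega)
  intro j hj hj'
  have hj2 : j < 2 * n - 1 := by omega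
  have hgA : heightsA[j] = heightsA.getD j 0 := (List.getD_eq_getElem _ _ hj).symm
  rw [hgA, getA j]
  by_cases hcase : j < n
  · rw [List.getElem_append_left (by rw [lenhalf]; omega)]
    rw [List.getElem_eq_getD (fallback := 0), halfget j hcase]
    congr 2
    rcases abs_cases ((j : Int) - ((n : Int) - 1)) with ⟨he, hs⟩ | ⟨he, hs⟩ <;> rw [he] <;> omega
  · rw [List.getElem_append_right (by rw [lenhalf]; omega)]
    rw [List.getElem_reverse, List.getElem_dropLast]
    rw [List.getElem_eq_getD (fallback := 0)]
    have hidx : (preScan th.reverse 0).dropLast.length - 1 - (j - (preScan th.reverse 0).length) = 2 * n - 2 - j := by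
      rw [List.length_dropLast, lenhalf]; omega
    rw [hidx, halfget _ (by omega)]
    congr 2
    rcases abs_cases ((j : Int) - ((n : Int) - 1)) with ⟨he, hs⟩ | ⟨he, hs⟩ <;> rw [he] <;> omega

theorem blocks_needed_spec : Claim_equal_blocks_needed := by
  intro layers priests _
  unfold Spec_blocks_needed blocks_needed blocks_needed_alt
  set l := PySem.List.pyRange 0 (layers - 1) with hl
  set th := l.foldl (bThickStep priests) [1] with hth
  have hth_ne : th ≠ [] := thick_ne_nil priests l [1] (by simp)
  have hA := thick_agree priests l [1] 1
  simp only [List.length_cons, List.length_nil, Nat.cast_one, zero_add] at hA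
  simp only [hA.1, hA.2, ← hth]
  rw [heights_eq th hth_ne]
  rw [foldl_sub]
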